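-- pv_equiv track=rewrite | github.com/arm/metis | src/metis/engine/tools/static_tools.py | _normalize_shell_grep_pattern
-- ===== SOURCE A (Python) =====
-- _SHELL_REGEX_REWRITES = (
--     (r"\s", "[[:space:]]"),
--     (r"\S", "[^[:space:]]"),
--     (r"\d", "[[:digit:]]"),
--     (r"\D", "[^[:digit:]]"),
--     (r"\w", "[[:alnum:]_]"),
--     (r"\W", "[^[:alnum:]_]"),
--     ("(?:", "("),
--     (r"\A", "^"),
--     (r"\Z", "$"),
-- )
--
-- def _normalize_shell_grep_pattern(pattern: str) -> tuple[str, bool]: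
--     normalized = str(pattern or "")
--     ignore_case = False
--     if normalized.startswith("(?i)"):
--         ignore_case = True
--         normalized = normalized[4:]
--     for source, replacement in _SHELL_REGEX_REWRITES:
--         normalized = normalized.replace(source, replacement)
--     return normalized, ignore_case
-- ===== SOURCE B (Python) =====
-- import re
--
-- _SHELL_REGEX_REWRITE_MAP = {
--     r"\s": "[[:space:]]",
--     r"\S": "[^[:space:]]",
--     r"\d": "[[:digit:]]",
--     r"\D": "[^[:digit:]]",
--     r"\w": "[[:alnum:]_]",
--     r"\W": "[^[:alnum:]_]",
--     "(?:": "(",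
--     r"\A": "^",
--     r"\Z": "$",
-- }
--
-- _SHELL_REGEX_REWRITE_RE = re.compile(
--     "|".join(re.escape(token) for token in _SHELL_REGEX_REWRITE_MAP)
-- )
--
-- def _normalize_shell_grep_pattern(pattern: str) -> tuple[str, bool]:
--     normalized = str(pattern or "")
--     ignore_case = False
--     if normalized.startswith("(?i)"):
--         ignore_case = True
--         normalized = normalized[4:]
--     normalized = _SHELL_REGEX_REWRITE_RE.sub(
--         lambda m: _SHELL_REGEX_REWRITE_MAP[m.group(0)], normalized
--     )
--     return normalized, ignore_case
-- ===== Notes on version B (the rewrite author's own statement) =====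
-- stated objective: alternative
-- what changed: Replaced the nine sequential full-string .replace passes with a single table-driven pass: one compiled regex alternating over the escaped source tokens and one re.sub whose callback looks the replacement up in a dict.
import Mathlib
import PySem

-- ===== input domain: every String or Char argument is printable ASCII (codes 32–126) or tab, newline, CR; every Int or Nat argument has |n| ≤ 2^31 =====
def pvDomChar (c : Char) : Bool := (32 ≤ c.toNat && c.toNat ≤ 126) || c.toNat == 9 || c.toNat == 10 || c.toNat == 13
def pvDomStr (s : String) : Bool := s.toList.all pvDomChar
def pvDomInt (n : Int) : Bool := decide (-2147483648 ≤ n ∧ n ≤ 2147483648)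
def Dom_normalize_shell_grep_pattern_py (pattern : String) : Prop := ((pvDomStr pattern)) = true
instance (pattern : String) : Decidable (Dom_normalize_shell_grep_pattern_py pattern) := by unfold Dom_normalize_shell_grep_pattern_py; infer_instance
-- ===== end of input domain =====

-- B replaces A's nine sequential full-string .replace passes by a single table-driven
-- left-to-right pass (one regex alternation over the escaped tokens + one re.sub);
-- the return value is proved identical on every string in the domain.

-- ===== PORT A =====
-- the module constant _SHELL_REGEX_REWRITES
def SHELL_REGEX_REWRITES : List (String × String) :=
  [("\\s", "[[:space:]]"), ("\\S", "[^[:space:]]"), ("\\d", "[[:digit:]]"),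
   ("\\D", "[^[:digit:]]"), ("\\w", "[[:alnum:]_]"), ("\\W", "[^[:alnum:]_]"),
   ("(?:", "("), ("\\A", "^"), ("\\Z", "$")]

-- 'str(pattern or "")' is the identity on a str argument ('' or '' = ''), so it is the input itself
def normalize_shell_grep_pattern_py (pattern : String) : String × Bool :=
  let normalized := pattern
  let ignore_case := PySem.Str.startswith normalized "(?i)"
  let normalized := if ignore_case then PySem.Str.slice normalized (some 4) none else normalized
  (SHELL_REGEX_REWRITES.foldl (fun acc p => PySem.Str.replace acc p.1 p.2) normalized, ignore_case)

-- ===== PORT B =====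
-- Source B's dict of rewrites, as (source token, replacement) over code points
def SHELL_REWRITE_TABLE : List (List Char × List Char) :=
  [("\\s".toList, "[[:space:]]".toList), ("\\S".toList, "[^[:space:]]".toList),
   ("\\d".toList, "[[:digit:]]".toList), ("\\D".toList, "[^[:digit:]]".toList),
   ("\\w".toList, "[[:alnum:]_]".toList), ("\\W".toList, "[^[:alnum:]_]".toList),
   ("(?:".toList, "(".toList), ("\\A".toList, "^".toList), ("\\Z".toList, "$".toList)]

-- the compiled alternation of the (re.escape'd) literal tokens: at a position, the first
-- token of the table that literally matches there (exact: Python's regex alternation of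
-- literals is first-alternative-wins at each position)
def tryTok : List (List Char × List Char) → List Char → Option (List Char × List Char)
  | [], _ => none
  | (o, n) :: rest, s => if o.isPrefixOf s then some (o, n) else tryTok rest s

-- re.sub with the lookup callback: scan left to right; on a match emit the replacement and
-- resume after the matched token, otherwise copy one character (exact: re.sub's
-- non-overlapping leftmost scan over an alternation of literal tokens)
def multiReplace (tbl : List (List Char × List Char)) : List Char → List Char
  | [] => []
  | c :: t =>
    match tryTok tbl (c :: t) with
    | some (o, n) => n ++ multiReplace tbl (List.drop (o.length - 1) t)
    | none => c :: multiReplace tbl t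
termination_by l => l.length
decreasing_by
  all_goals simp [List.length_drop]

def normalize_shell_grep_pattern_py_alt (pattern : String) : String × Bool :=
  let ignore_case := PySem.Str.startswith pattern "(?i)"
  let normalized := if ignore_case then PySem.Str.slice pattern (some 4) none else pattern
  (String.ofList (multiReplace SHELL_REWRITE_TABLE normalized.toList), ignore_case)

-- ===== PRECONDITION & SPEC =====
def Spec_normalize_shell_grep_pattern_py (pattern : String) (out : String × Bool) : Prop := out = normalize_shell_grep_pattern_py_alt pattern
instance (pattern : String) (out : String × Bool) : Decidable (Spec_normalize_shell_grep_pattern_py pattern out) := by unfold Spec_normalize_shell_grep_pattern_py; infer_instance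

-- ===== CLAIM (what is proved, stated in full; the proofs are below) =====
def Claim_equal_normalize_shell_grep_pattern_py : Prop := ∀ (pattern : String), Dom_normalize_shell_grep_pattern_py pattern → Spec_normalize_shell_grep_pattern_py pattern (normalize_shell_grep_pattern_py pattern)

-- ===== LEMMAS AND PROOFS =====

-- head-recursive characterisation of one .replace pass (old ≠ [])
def replCore (o n : List Char) : List Char → List Char
  | [] => []
  | c :: t =>
    if o.isPrefixOf (c :: t) then n ++ replCore o n (List.drop (o.length - 1) t)
    else c :: replCore o n t
termination_by l => l.length
decreasing_by
  all_goals simp [List.length_drop]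

theorem replCore_nil (o n : List Char) : replCore o n [] = [] := by rw [replCore.eq_def]

theorem replCore_pos (o n : List Char) (c : Char) (t : List Char)
    (h : o.isPrefixOf (c :: t) = true) :
    replCore o n (c :: t) = n ++ replCore o n (List.drop (o.length - 1) t) := by
  rw [replCore.eq_def]; simp [h]

theorem replCore_neg (o n : List Char) (c : Char) (t : List Char)
    (h : ¬ o.isPrefixOf (c :: t) = true) :
    replCore o n (c :: t) = c :: replCore o n t := by
  rw [replCore.eq_def]; simp [h]

theorem go_spec (o n : List Char) (ho : o ≠ []) :
    ∀ (fuel : Nat) (l acc : List Char), l.length ≤ fuel →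
      PySem.Chars.replace.go o n fuel l acc = acc.reverse ++ replCore o n l := by
  intro fuel
  induction fuel with
  | zero =>
    intro l acc hl
    have : l = [] := by cases l <;> simp_all
    subst this
    rw [PySem.Chars.replace.go]; simp [replCore_nil]
  | succ fuel ih =>
    intro l acc hl
    cases l with
    | nil =>
      rw [PySem.Chars.replace.go]; simp [replCore_nil]
      omega
    | cons c t =>
      rw [PySem.Chars.replace.go]
      by_cases hp : o.isPrefixOf (c :: t) = true
      · simp only [hp, if_true]
        have hop : 0 < o.length := List.length_pos_of_ne_nil ho
        have hlen : (List.drop o.length (c :: t)).length ≤ fuel := by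
          simp [List.length_drop] at *
          omega
        rw [ih _ _ hlen, replCore_pos o n c t hp]
        have : List.drop o.length (c :: t) = List.drop (o.length - 1) t := by
          cases o with
          | nil => exact absurd rfl ho
          | cons a o' => simp
        rw [this]; simp
      · simp only [hp]
        have hlen : t.length ≤ fuel := by simp at hl; omega
        rw [ih _ _ hlen, replCore_neg o n c t hp]
        simp

theorem replace_eq_replCore (o n l : List Char) (ho : o ≠ []) :
    PySem.Chars.replace l o n = replCore o n l := by
  have hne : o.isEmpty = false := by cases o <;> simp_all
  rw [PySem.Chars.replace]
  simp only [hne, Bool.false_eq_true, if_false]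
  exact go_spec o n ho l.length l [] le_rfl

-- multiReplace equations
theorem M_nil (tbl : List (List Char × List Char)) : multiReplace tbl [] = [] := by
  rw [multiReplace.eq_def]

theorem M_cons_match (tbl : List (List Char × List Char)) (c : Char) (t o n : List Char)
    (h : tryTok tbl (c :: t) = some (o, n)) :
    multiReplace tbl (c :: t) = n ++ multiReplace tbl (List.drop (o.length - 1) t) := by
  rw [multiReplace.eq_def]; simp only []; rw [h]

theorem M_cons_none (tbl : List (List Char × List Char)) (c : Char) (t : List Char)
    (h : tryTok tbl (c :: t) = none) :
    multiReplace tbl (c :: t) = c :: multiReplace tbl t := by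
  rw [multiReplace.eq_def]; simp only []; rw [h]

theorem M_id : ∀ (l : List Char), multiReplace [] l = l := by
  intro l
  induction l with
  | nil => exact M_nil []
  | cons c t ih => rw [M_cons_none [] c t rfl, ih]

-- tryTok facts
theorem tryTok_eq_none (tbl : List (List Char × List Char)) (s : List Char)
    (h : ∀ p ∈ tbl, ¬ p.1 <+: s) : tryTok tbl s = none := by
  induction tbl with
  | nil => rfl
  | cons p rest ih =>
    obtain ⟨o, n⟩ := p
    have h1 : ¬ o <+: s := h (o, n) (List.mem_cons_self ..)
    have h2 : o.isPrefixOf s = false := by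
      rw [← Bool.not_eq_true, List.isPrefixOf_iff_prefix]; exact h1
    simp only [tryTok, h2, Bool.false_eq_true, if_false]
    exact ih fun p hp => h p (List.mem_cons_of_mem _ hp)

theorem tryTok_congr (tbl : List (List Char × List Char)) (s s' : List Char)
    (h : ∀ p ∈ tbl, (p.1 <+: s ↔ p.1 <+: s')) : tryTok tbl s = tryTok tbl s' := by
  induction tbl with
  | nil => rfl
  | cons p rest ih =>
    obtain ⟨o, n⟩ := p
    have hiff := h (o, n) (List.mem_cons_self ..)
    simp only [tryTok]
    by_cases hp : o.isPrefixOf s = true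
    · have : o.isPrefixOf s' = true := by
        rw [List.isPrefixOf_iff_prefix] at *
        exact hiff.mp hp
      simp [hp, this]
    · have : ¬ o.isPrefixOf s' = true := by
        rw [List.isPrefixOf_iff_prefix] at *
        exact fun hx => hp (hiff.mpr hx)
      simp only [hp, Bool.false_eq_true, if_false, this]
      exact ih fun p hp => h p (List.mem_cons_of_mem _ hp)

-- head of a token list avoids a set of characters
def headNotIn (w s : List Char) : Prop := ∀ h ∈ w.take 1, h ∉ s

-- copying a block none of whose characters can start a token
theorem OP_push (tbl : List (List Char × List Char))
    (hne : ∀ p ∈ tbl, p.1 ≠ []) :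
    ∀ (pre z : List Char), (∀ p ∈ tbl, headNotIn p.1 pre) →
      multiReplace tbl (pre ++ z) = pre ++ multiReplace tbl z := by
  intro pre
  induction pre with
  | nil => intro z _; simp
  | cons a pre' ih =>
    intro z hh
    have hnone : tryTok tbl (a :: (pre' ++ z)) = none := by
      apply tryTok_eq_none
      intro p hp hpre
      obtain ⟨o, n⟩ := p
      cases o with
      | nil => exact (hne (⟨[], n⟩) hp) rfl
      | cons h o' =>
        have hha : h ∉ a :: pre' := hh (h :: o', n) hp h (by simp)
        exact hha ((List.cons_prefix_cons.mp hpre).1 ▸ List.mem_cons_self ..)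
    have hh' : ∀ p ∈ tbl, headNotIn p.1 pre' := by
      intro p hp h hm hmem
      exact hh p hp h hm (List.mem_cons_of_mem _ hmem)
    rw [List.cons_append, M_cons_none tbl a (pre' ++ z) hnone, ih z hh']
    simp

-- a failed token match cannot start matching after a replacement pass
theorem notPf (o n : List Char) (hn : n ≠ []) :
    ∀ (t w : List Char), headNotIn n w → ¬ w <+: t → ¬ w <+: replCore o n t := by
  intro t
  induction t with
  | nil => intro w _ hw; rw [replCore_nil]; exact hw
  | cons c t' ih =>
    intro w hh hw
    by_cases hp : o.isPrefixOf (c :: t') = true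
    · rw [replCore_pos o n c t' hp]
      cases w with
      | nil => exact absurd (List.nil_prefix) hw
      | cons h w' =>
        cases n with
        | nil => exact absurd rfl hn
        | cons hn1 n' =>
          intro hpre
          rw [List.cons_append] at hpre
          have hhn : h = hn1 := (List.cons_prefix_cons.mp hpre).1
          exact hh hn1 (by simp) (by rw [← hhn]; exact List.mem_cons_self ..)
    · rw [replCore_neg o n c t' hp]
      cases w with
      | nil => exact absurd (List.nil_prefix) hw
      | cons h w' =>
        intro hpre
        rcases hpre with ⟨x, hx⟩
        injection hx with h1 h2
        subst h1
        have hw' : ¬ w' <+: t' := by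
          intro hx2
          exact hw (List.cons_prefix_cons.mpr ⟨rfl, hx2⟩)
        have hh' : headNotIn n w' := fun q hq hqm => hh q hq (List.mem_cons_of_mem _ hqm)
        exact ih w' hh' hw' ⟨x, h2⟩

-- skipping positions where the token cannot match
theorem Lskip (o n : List Char) :
    ∀ (m : Nat) (x : List Char), m ≤ x.length →
      (∀ k < m, ¬ o <+: x.drop k) →
      replCore o n x = x.take m ++ replCore o n (x.drop m) := by
  intro m
  induction m with
  | zero => intro x _ _; simp
  | succ m ih =>
    intro x hm hk
    cases x with
    | nil => simp at hm
    | cons c t =>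
      have h0 : ¬ o <+: (c :: t) := by
        have := hk 0 (Nat.succ_pos m); simpa using this
      have h0' : ¬ o.isPrefixOf (c :: t) = true := by
        rw [List.isPrefixOf_iff_prefix]; exact h0
      rw [replCore_neg o n c t h0']
      have := ih t (by simp at hm; omega) (fun k hkm => by
        have := hk (k+1) (by omega)
        simpa using this)
      rw [this]
      simp

-- prefix-free table: a token is a prefix of (token ++ anything) only if equal
theorem pfx_token (tbl : List (List Char × List Char))
    (hpf : ∀ p ∈ tbl, ∀ q ∈ tbl, p.1 <+: q.1 → p.1 = q.1)
    (p : List Char × List Char) (hp : p ∈ tbl)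
    (q : List Char × List Char) (hq : q ∈ tbl) (z : List Char) :
    (p.1 <+: q.1 ++ z ↔ p.1 = q.1) := by
  constructor
  · intro hpre
    rcases List.prefix_or_prefix_of_prefix hpre (List.prefix_append q.1 z) with h | h
    · exact hpf p hp q hq h
    · exact (hpf q hq p hp h).symm
  · intro h; rw [h]; exact List.prefix_append q.1 z

-- tryTok result facts
theorem tryTok_some_spec (tbl : List (List Char × List Char)) (s : List Char)
    (o n : List Char) (h : tryTok tbl s = some (o, n)) : (o, n) ∈ tbl ∧ o <+: s := by
  induction tbl with
  | nil => simp [tryTok] at h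
  | cons p rest ih =>
    obtain ⟨op, np⟩ := p
    simp only [tryTok] at h
    by_cases hp : op.isPrefixOf s = true
    · rw [if_pos hp] at h
      injection h with h'
      injection h' with h1 h2
      subst h1; subst h2
      exact ⟨List.mem_cons_self .., List.isPrefixOf_iff_prefix.mp hp⟩
    · rw [if_neg hp] at h
      have := ih h
      exact ⟨List.mem_cons_of_mem _ this.1, this.2⟩

theorem tryTok_none_spec (tbl : List (List Char × List Char)) (s : List Char)
    (h : tryTok tbl s = none) : ∀ p ∈ tbl, ¬ p.1 <+: s := by
  induction tbl with
  | nil => simp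
  | cons p rest ih =>
    obtain ⟨op, np⟩ := p
    simp only [tryTok] at h
    by_cases hp : op.isPrefixOf s = true
    · rw [if_pos hp] at h; exact absurd h (by simp)
    · rw [if_neg hp] at h
      intro q hq
      rcases List.mem_cons.mp hq with hq1 | hq2
      · subst hq1
        simpa [List.isPrefixOf_iff_prefix] using hp
      · exact ih h q hq2

-- conditions under which one replace pass commutes into the multi-token pass
theorem STEP (o n : List Char) (tbl : List (List Char × List Char))
    (ho : o ≠ []) (hn : n ≠ [])
    (htne : ∀ p ∈ tbl, p.1 ≠ [])
    (h3 : ∀ p ∈ tbl, headNotIn p.1 n)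
    (h4 : ∀ p ∈ tbl, headNotIn o p.1.tail)
    (h5 : ∀ p ∈ tbl, headNotIn n p.1.tail)
    (hpf : ∀ p ∈ ((o,n)::tbl), ∀ q ∈ ((o,n)::tbl), p.1 <+: q.1 → p.1 = q.1) :
    ∀ (N : Nat) (x : List Char), x.length ≤ N →
      multiReplace tbl (replCore o n x) = multiReplace ((o,n)::tbl) x := by
  intro N
  induction N with
  | zero =>
    intro x hx
    have : x = [] := by cases x <;> simp_all
    subst this
    rw [replCore_nil, M_nil, M_nil]
  | succ N ih =>
    intro x hx
    cases x with
    | nil => rw [replCore_nil, M_nil, M_nil]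
    | cons c t =>
      have hop : 0 < o.length := List.length_pos_of_ne_nil ho
      by_cases hox : o.isPrefixOf (c :: t) = true
      · -- the stripped token matches at the head
        have hopre : o <+: (c :: t) := List.isPrefixOf_iff_prefix.mp hox
        have htry : tryTok ((o,n)::tbl) (c :: t) = some (o, n) := by
          simp [tryTok, hox]
        rw [M_cons_match _ c t o n htry]
        rw [replCore_pos o n c t hox]
        rw [OP_push tbl htne n _ h3]
        congr 1
        have hlen : (List.drop (o.length - 1) t).length ≤ N := by
          simp only [List.length_drop]
          simp only [List.length_cons] at hx
          omega
        exact ih _ hlen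
      · have hoxp : ¬ o <+: (c :: t) := fun hc => hox (List.isPrefixOf_iff_prefix.mpr hc)
        cases htr : tryTok tbl (c :: t) with
        | some p =>
          obtain ⟨oi, ni⟩ := p
          obtain ⟨hmem, hipre⟩ := tryTok_some_spec tbl (c :: t) oi ni htr
          have hine : oi ≠ [] := htne (oi, ni) hmem
          have hiop : 0 < oi.length := List.length_pos_of_ne_nil hine
          have hile : oi.length ≤ (c :: t).length := hipre.length_le
          obtain ⟨r, hr⟩ := hipre
          -- no o-match inside the first oi.length positions
          have hnomatch : ∀ k < oi.length, ¬ o <+: (c :: t).drop k := by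
            intro k hk hcon
            cases k with
            | zero => exact hoxp (by simpa using hcon)
            | succ k' =>
              have hdk : (c :: t).drop (k'+1) = oi.drop (k'+1) ++ r := by
                rw [← hr, List.drop_append_of_le_length (by omega)]
              rw [hdk] at hcon
              cases hdo : oi.drop (k'+1) with
              | nil => simp [List.drop_eq_nil_iff] at hdo; omega
              | cons d ds =>
                rw [hdo, List.cons_append] at hcon
                cases o with
                | nil => exact ho rfl
                | cons ho1 o' =>
                  have hd : ho1 = d := (List.cons_prefix_cons.mp hcon).1
                  have hdmem : d ∈ oi.tail := by
                    have : d ∈ oi.drop (k'+1) := by rw [hdo]; exact List.mem_cons_self ..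
                    have h2 : oi.drop (k'+1) = (oi.drop 1).drop k' := by
                      rw [List.drop_drop, Nat.add_comm]
                    rw [h2] at this
                    have := List.mem_of_mem_drop this
                    simpa [List.drop_one] using this
                  exact h4 (oi, ni) hmem ho1 (by simp) (hd ▸ hdmem)
          have hskip : replCore o n (c :: t) = oi ++ replCore o n ((c :: t).drop oi.length) := by
            have := Lskip o n oi.length (c :: t) hile hnomatch
            rw [this]
            congr 1
            exact (List.prefix_iff_eq_take.mp ⟨r, hr⟩).symm
          have hdropr : (c :: t).drop oi.length = r := by
            rw [← hr, List.drop_left]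
          -- the scanner finds the same first token after the o-pass on the tail
          have hcongr : tryTok tbl (oi ++ replCore o n r) = tryTok tbl (oi ++ r) := by
            apply tryTok_congr
            intro p hp
            have hpfx1 := pfx_token tbl
              (fun p hp q hq => hpf p (List.mem_cons_of_mem _ hp) q (List.mem_cons_of_mem _ hq))
              p hp (oi, ni) hmem (replCore o n r)
            have hpfx2 := pfx_token tbl
              (fun p hp q hq => hpf p (List.mem_cons_of_mem _ hp) q (List.mem_cons_of_mem _ hq))
              p hp (oi, ni) hmem r
            rw [hpfx1, hpfx2]
          have htryrepl : tryTok tbl (oi ++ replCore o n r) = some (oi, ni) := by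
            rw [hcongr, hr, htr]
          -- left side
          cases oi with
          | nil => exact absurd rfl hine
          | cons d oi' =>
            rw [hskip, hdropr]
            rw [List.cons_append]
            rw [M_cons_match tbl d (oi' ++ replCore o n r) (d :: oi') ni
              (by rw [← List.cons_append]; exact htryrepl)]
            have hdrop2 : List.drop ((d :: oi').length - 1) (oi' ++ replCore o n r) =
                replCore o n r := by
              simp
            rw [hdrop2]
            -- right side
            have htryfull : tryTok ((o,n)::tbl) (c :: t) = some (d :: oi', ni) := by
              simp only [tryTok, hox, Bool.false_eq_true, if_false]
              exact htr
            rw [M_cons_match ((o,n)::tbl) c t (d :: oi') ni htryfull]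
            congr 1
            have hrt : List.drop ((d :: oi').length - 1) t = r := by
              have : List.drop (d :: oi').length (c :: t) = r := hdropr
              simpa using this
            rw [hrt]
            have hrlen : r.length ≤ N := by
              have := congrArg List.length hr
              simp at this hx
              omega
            exact ih r hrlen
        | none =>
          have hreplc : replCore o n (c :: t) = c :: replCore o n t :=
            replCore_neg o n c t hox
          have hnone2 : tryTok tbl (c :: replCore o n t) = none := by
            apply tryTok_eq_none
            intro p hp
            obtain ⟨op, np⟩ := p
            have hnp : ¬ op <+: (c :: t) := tryTok_none_spec tbl (c :: t) htr (op, np) hp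
            cases op with
            | nil => exact absurd rfl (htne ([], np) hp)
            | cons h op' =>
              intro hcon
              obtain ⟨hh, hcon'⟩ := List.cons_prefix_cons.mp hcon
              subst hh
              have hw : ¬ op' <+: t := fun hx2 =>
                hnp (List.cons_prefix_cons.mpr ⟨rfl, hx2⟩)
              have : headNotIn n op' := fun q hq => h5 (h :: op', np) hp q hq
              exact notPf o n hn t op' this hw hcon'
          rw [hreplc, M_cons_none tbl c _ hnone2]
          have htlen : t.length ≤ N := by simp at hx; omega
          rw [ih t htlen]
          have hnonef : tryTok ((o,n)::tbl) (c :: t) = none := by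
            simp only [tryTok, hox, Bool.false_eq_true, if_false]
            exact htr
          rw [M_cons_none ((o,n)::tbl) c t hnonef]

def FoldC (tbl : List (List Char × List Char)) (x : List Char) : List Char :=
  tbl.foldl (fun s p => replCore p.1 p.2 s) x

def Good : List (List Char × List Char) → Prop
  | [] => True
  | (o, n) :: tbl =>
      o ≠ [] ∧ n ≠ [] ∧ (∀ p ∈ tbl, p.1 ≠ []) ∧ (∀ p ∈ tbl, headNotIn p.1 n) ∧
      (∀ p ∈ tbl, headNotIn o p.1.tail) ∧ (∀ p ∈ tbl, headNotIn n p.1.tail) ∧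
      (∀ p ∈ ((o,n)::tbl), ∀ q ∈ ((o,n)::tbl), p.1 <+: q.1 → p.1 = q.1) ∧ Good tbl

theorem CHAIN : ∀ (tbl : List (List Char × List Char)), Good tbl →
    ∀ (x : List Char), FoldC tbl x = multiReplace tbl x := by
  intro tbl
  induction tbl with
  | nil => intro _ x; simp [FoldC, M_id]
  | cons p rest ih =>
    obtain ⟨o, n⟩ := p
    intro hg x
    obtain ⟨ho, hn, htne, h3, h4, h5, hpf, hrest⟩ := hg
    have : FoldC ((o,n)::rest) x = FoldC rest (replCore o n x) := by simp [FoldC]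
    rw [this, ih hrest (replCore o n x)]
    exact STEP o n rest ho hn htne h3 h4 h5 hpf x.length x le_rfl

theorem good_table : Good SHELL_REWRITE_TABLE := by
  simp [Good, SHELL_REWRITE_TABLE, headNotIn]

theorem table_map :
    SHELL_REGEX_REWRITES.map (fun p => (p.1.toList, p.2.toList)) = SHELL_REWRITE_TABLE := by
  decide

-- String-level fold of A equals the char-level fold
theorem strFold_eq (tblS : List (String × String))
    (h : ∀ p ∈ tblS, p.1.toList ≠ []) :
    ∀ (s : String), tblS.foldl (fun acc p => PySem.Str.replace acc p.1 p.2) s =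
      String.ofList (FoldC (tblS.map fun p => (p.1.toList, p.2.toList)) s.toList) := by
  induction tblS with
  | nil => intro s; simp [FoldC]
  | cons p rest ih =>
    obtain ⟨o, n⟩ := p
    intro s
    have h1 : o.toList ≠ [] := h (o, n) (List.mem_cons_self ..)
    have hstep : PySem.Str.replace s o n = String.ofList (replCore o.toList n.toList s.toList) := by
      rw [PySem.Str.replace, replace_eq_replCore _ _ _ h1]
    calc ((o,n)::rest).foldl (fun acc p => PySem.Str.replace acc p.1 p.2) s
        = rest.foldl (fun acc p => PySem.Str.replace acc p.1 p.2) (PySem.Str.replace s o n) := by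
          simp
      _ = String.ofList (FoldC (rest.map fun p => (p.1.toList, p.2.toList)) (PySem.Str.replace s o n).toList) :=
          ih (fun p hp => h p (List.mem_cons_of_mem _ hp)) _
      _ = String.ofList (FoldC (((o,n)::rest).map fun p => (p.1.toList, p.2.toList)) s.toList) := by
          rw [hstep]; simp [FoldC]

-- ===== VERDICT (by name: the statement is the Claim_ definition above) =====
theorem normalize_shell_grep_pattern_py_spec : Claim_equal_normalize_shell_grep_pattern_py := by
  intro pattern _
  unfold Spec_normalize_shell_grep_pattern_py normalize_shell_grep_pattern_py
    normalize_shell_grep_pattern_py_alt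
  simp only []
  rw [strFold_eq SHELL_REGEX_REWRITES (by simp [SHELL_REGEX_REWRITES]), table_map,
    CHAIN SHELL_REWRITE_TABLE good_table]
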